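-- pv_equiv track=rewrite | github.com/sahradeniz/Astrologi-Ai | backend/archetype_engine.py | call_ai_model
-- ===== SOURCE A (Python) =====
-- def call_ai_model(prompt: str) -> str:
--     """Placeholder for the AI life expression generator.
--
--     This implementation extracts key fields from the prompt and returns a deterministic,
--     poetic narrative so the system remains functional without external dependencies.
--     """
--     themes_line = ""
--     tone = ""
--     axis = ""
--     focus = ""
--
--     for raw_line in prompt.splitlines():
--         line = raw_line.strip()
--         if not line:
--             continue
--         if line.lower().startswith("themes:"):
--             themes_line = line.split(":", 1)[1].strip()
--         elif line.lower().startswith("tone:"):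
--             tone = line.split(":", 1)[1].strip()
--         elif line.lower().startswith("axis:"):
--             axis = line.split(":", 1)[1].strip()
--         elif line.lower().startswith("focus:"):
--             focus = line.split(":", 1)[1].strip()
--
--     themes_text = themes_line or "ruhsal motifler"
--     tone_text = tone or "yumuşak dönüşüm"
--     axis_text = axis or "Kova–Aslan"
--     focus_text = focus or "öz farkındalık"
--
--     return (
--         f"{tone_text.capitalize()} bir anlatı seni çağırıyor. {axis_text} hattından yükselen enerji, "
--         f"{themes_text} temaları etrafında örülerek {focus_text} yönünde akıyor. "
--         "Her gün yeni bir sembol, yeni bir içgörü getiriyor; nefes alırken bu hikâyeyi bedeninde taşıyorsun."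
--     )
-- ===== SOURCE B (Python) =====
-- def call_ai_model(prompt: str) -> str:
--     """Single-pass parse into a field table, then one lookup per field."""
--     fields = {}
--     for raw_line in prompt.splitlines():
--         line = raw_line.strip()
--         if not line or ":" not in line:
--             continue
--         key, value = line.split(":", 1)
--         fields[key.lower()] = value.strip()
--
--     themes_text = fields.get("themes", "") or "ruhsal motifler"
--     tone_text = fields.get("tone", "") or "yumuşak dönüşüm"
--     axis_text = fields.get("axis", "") or "Kova–Aslan"
--     focus_text = fields.get("focus", "") or "öz farkındalık"
--
--     return (
--         f"{tone_text.capitalize()} bir anlatı seni çağırıyor. {axis_text} hattından yükselen enerji, "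
--         f"{themes_text} temaları etrafında örülerek {focus_text} yönünde akıyor. "
--         "Her gün yeni bir sembol, yeni bir içgörü getiriyor; nefes alırken bu hikâyeyi bedeninde taşıyorsun."
--     )
-- ===== Notes on version B (the rewrite author's own statement) =====
-- stated objective: idiomatic
-- what changed: Replaces the four-way elif/startswith chain with one parse pass that splits each line at its first ':' into a dict keyed by the lowercased pre-colon text (later lines overwrite), then reads the four fields by dict lookup.
import Mathlib
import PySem

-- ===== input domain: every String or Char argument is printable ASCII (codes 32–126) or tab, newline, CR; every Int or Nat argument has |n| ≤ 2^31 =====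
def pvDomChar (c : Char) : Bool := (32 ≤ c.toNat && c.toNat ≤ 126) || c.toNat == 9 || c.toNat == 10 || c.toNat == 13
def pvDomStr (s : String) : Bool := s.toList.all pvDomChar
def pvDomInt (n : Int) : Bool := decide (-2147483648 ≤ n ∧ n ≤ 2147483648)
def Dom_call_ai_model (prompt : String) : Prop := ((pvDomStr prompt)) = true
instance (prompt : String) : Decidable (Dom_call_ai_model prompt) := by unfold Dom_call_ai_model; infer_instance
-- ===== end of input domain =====

-- B replaces A's four-way elif/startswith chain by one parse-into-dict pass plus four lookups (idiomatic; same cost).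

-- shared primitive: line.split(":", 1).  ":" is a nonempty separator, so splitMax? is always `some`;
-- the `.getD []` default is never reached.
def splitC (line : String) : List String := (PySem.Str.splitMax? line ":" 1).getD []

-- hand port of str.capitalize (upper first char, lower the rest): exact for ASCII input and for the
-- Turkish default literals, whose non-first characters are not ASCII uppercase.
def pyCapitalize (s : String) : String :=
  match s.toList with
  | [] => ""
  | c :: rest => String.ofList (PySem.Chars.upperChar c :: PySem.Chars.lower rest)

-- ===== PORT A =====
-- A's loop state: (themes_line, tone, axis, focus)
def stepA (st : String × String × String × String) (raw_line : String) :
    String × String × String × String :=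
  let line := PySem.Str.strip raw_line
  if line = "" then st
  else if PySem.Str.startswith (PySem.Str.lower line) "themes:" then
    (PySem.Str.strip ((PySem.List.pyGet? (splitC line) 1).getD ""), st.2.1, st.2.2.1, st.2.2.2)
  else if PySem.Str.startswith (PySem.Str.lower line) "tone:" then
    (st.1, PySem.Str.strip ((PySem.List.pyGet? (splitC line) 1).getD ""), st.2.2.1, st.2.2.2)
  else if PySem.Str.startswith (PySem.Str.lower line) "axis:" then
    (st.1, st.2.1, PySem.Str.strip ((PySem.List.pyGet? (splitC line) 1).getD ""), st.2.2.2)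
  else if PySem.Str.startswith (PySem.Str.lower line) "focus:" then
    (st.1, st.2.1, st.2.2.1, PySem.Str.strip ((PySem.List.pyGet? (splitC line) 1).getD ""))
  else st

def call_ai_model (prompt : String) : String :=
  let st := (PySem.Str.splitlines prompt).foldl stepA ("", "", "", "")
  let themes_text := if st.1 = "" then "ruhsal motifler" else st.1
  let tone_text := if st.2.1 = "" then "yumuşak dönüşüm" else st.2.1
  let axis_text := if st.2.2.1 = "" then "Kova–Aslan" else st.2.2.1
  let focus_text := if st.2.2.2 = "" then "öz farkındalık" else st.2.2.2
  pyCapitalize tone_text ++ " bir anlatı seni çağırıyor. " ++ axis_text ++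
    " hattından yükselen enerji, " ++ themes_text ++ " temaları etrafında örülerek " ++
    focus_text ++ " yönünde akıyor. " ++
    "Her gün yeni bir sembol, yeni bir içgörü getiriyor; nefes alırken bu hikâyeyi bedeninde taşıyorsun."

-- ===== PORT B =====
def stepB (d : PySem.Dict String String) (raw_line : String) : PySem.Dict String String :=
  let line := PySem.Str.strip raw_line
  if line = "" then d
  else if PySem.Str.isIn ":" line then
    d.insert (PySem.Str.lower ((PySem.List.pyGet? (splitC line) 0).getD ""))
      (PySem.Str.strip ((PySem.List.pyGet? (splitC line) 1).getD ""))
  else d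

def call_ai_model_alt (prompt : String) : String :=
  let fields := (PySem.Str.splitlines prompt).foldl stepB PySem.Dict.empty
  let themes_text := if fields.getD "themes" "" = "" then "ruhsal motifler" else fields.getD "themes" ""
  let tone_text := if fields.getD "tone" "" = "" then "yumuşak dönüşüm" else fields.getD "tone" ""
  let axis_text := if fields.getD "axis" "" = "" then "Kova–Aslan" else fields.getD "axis" ""
  let focus_text := if fields.getD "focus" "" = "" then "öz farkındalık" else fields.getD "focus" ""
  pyCapitalize tone_text ++ " bir anlatı seni çağırıyor. " ++ axis_text ++
    " hattından yükselen enerji, " ++ themes_text ++ " temaları etrafında örülerek " ++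
    focus_text ++ " yönünde akıyor. " ++
    "Her gün yeni bir sembol, yeni bir içgörü getiriyor; nefes alırken bu hikâyeyi bedeninde taşıyorsun."

-- ===== PRECONDITION & SPEC =====
def Spec_call_ai_model (prompt : String) (out : String) : Prop := out = call_ai_model_alt prompt
instance (prompt : String) (out : String) : Decidable (Spec_call_ai_model prompt out) := by unfold Spec_call_ai_model; infer_instance

-- ===== CLAIM (what is proved, stated in full; the proofs are below) =====
def Claim_equal_call_ai_model : Prop := ∀ (prompt : String), Dom_call_ai_model prompt → Spec_call_ai_model prompt (call_ai_model prompt)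

-- ===== LEMMAS AND PROOFS =====

theorem go_zero (sep : List Char) (fuel : Nat) (l cur : List Char) (acc : List (List Char)) :
    PySem.Chars.splitOnMax.go sep fuel 0 l cur acc = ((cur.reverse ++ l) :: acc).reverse := by
  cases fuel <;> cases l <;> simp [PySem.Chars.splitOnMax.go]

theorem go_one (cs : List Char) (cur : List Char) (acc : List (List Char)) (fuel : Nat)
    (h : cs.length < fuel) :
    PySem.Chars.splitOnMax.go [':'] fuel 1 cs cur acc =
      if ':' ∈ cs then
        acc.reverse ++ [cur.reverse ++ cs.takeWhile (fun c => c != ':'),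
                        (cs.dropWhile (fun c => c != ':')).tail]
      else acc.reverse ++ [cur.reverse ++ cs] := by
  induction cs generalizing cur acc fuel with
  | nil =>
    cases fuel with
    | zero => omega
    | succ f => simp [PySem.Chars.splitOnMax.go]
  | cons c rest ih =>
    cases fuel with
    | zero => omega
    | succ f =>
      by_cases hc : c = ':'
      · subst hc
        simp [PySem.Chars.splitOnMax.go, List.isPrefixOf, go_zero]
      · have hc' : ¬ (':' = c) := fun e => hc e.symm
        rw [show PySem.Chars.splitOnMax.go [':'] (f+1) 1 (c :: rest) cur acc =
            PySem.Chars.splitOnMax.go [':'] f 1 rest (c :: cur) acc from by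
              simp [PySem.Chars.splitOnMax.go, List.isPrefixOf, hc']]
        rw [ih (c :: cur) acc f (by simpa using Nat.lt_of_succ_lt_succ h)]
        simp [hc]
        by_cases hm : ':' ∈ rest <;> simp [hm, hc']

theorem splitC_eq (line : String) :
    splitC line =
      if ':' ∈ line.toList then
        [String.ofList (line.toList.takeWhile (fun c => c != ':')),
         String.ofList ((line.toList.dropWhile (fun c => c != ':')).tail)]
      else [line] := by
  unfold splitC
  rw [PySem.Str.splitMax?]
  show (Option.map _ (PySem.Chars.splitMax? line.toList [':'] 1)).getD [] = _
  rw [PySem.Chars.splitMax?]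
  simp only [List.isEmpty_cons, if_false, Bool.false_eq_true]
  rw [PySem.Chars.splitOnMax]
  simp only [show ¬ ((1:Int) < 0) from by norm_num, if_false]
  rw [show (1:Int).toNat = 1 from rfl]
  rw [go_one _ _ _ _ (by omega)]
  by_cases hm : ':' ∈ line.toList <;> simp [hm]

theorem lowerChar_eq_colon (c : Char) : PySem.Chars.lowerChar c = ':' ↔ c = ':' := by
  unfold PySem.Chars.lowerChar PySem.Chars.isupper
  split_ifs with h
  · simp only [Bool.and_eq_true, decide_eq_true_eq, Char.le_def, UInt32.le_iff_toNat_le] at h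
    have hA : ('A' : Char).val.toNat = 65 := by decide
    have hZ : ('Z' : Char).val.toNat = 90 := by decide
    have hb : 65 ≤ c.toNat ∧ c.toNat ≤ 90 := by unfold Char.toNat; omega
    constructor
    · intro he
      have h2 := congrArg Char.toNat he
      rw [Char.toNat_ofNat, if_pos (Or.inl (by omega : c.toNat + 32 < 55296))] at h2
      have hcol : (':' : Char).toNat = 58 := by decide
      exfalso; omega
    · intro he
      exfalso
      subst he
      have : (':' : Char).toNat = 58 := by decide
      omega
  · exact Iff.rfl

theorem key_char (cs : List Char) (k : List Char) (hk : ':' ∉ k) :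
    (PySem.Chars.startswith (PySem.Chars.lower cs) (k ++ [':']) = true ↔
      (':' ∈ cs ∧ PySem.Chars.lower (cs.takeWhile (fun c => c != ':')) = k)) := by
  induction cs generalizing k with
  | nil => simp [PySem.Chars.startswith, PySem.Chars.lower]
  | cons c rest ih =>
    have hl : PySem.Chars.lowerChar ':' = ':' := by decide
    cases k with
    | nil =>
      by_cases hc : c = ':'
      · subst hc
        simp [PySem.Chars.startswith, PySem.Chars.lower, List.isPrefixOf, hl]
      · have hlc : PySem.Chars.lowerChar c ≠ ':' := fun e => hc ((lowerChar_eq_colon c).mp e)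
        simp [PySem.Chars.startswith, PySem.Chars.lower, List.isPrefixOf, hc]
        exact fun e => hlc (Eq.symm e)
    | cons a k' =>
      have ha : a ≠ ':' := by simp at hk; tauto
      have hk' : ':' ∉ k' := by simp at hk; tauto
      by_cases hc : c = ':'
      · subst hc
        simp [PySem.Chars.startswith, PySem.Chars.lower, List.isPrefixOf, hl]
        exact fun e => absurd e ha
      · have hthis := ih k' hk'
        simp only [PySem.Chars.startswith, PySem.Chars.lower] at hthis ⊢
        simp only [List.map_cons, List.cons_append, List.takeWhile_cons,
          show (c != ':') = true from by simp [hc], if_true, List.isPrefixOf, Bool.and_eq_true,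
          beq_iff_eq, List.mem_cons]
        rw [show ((k' ++ [':']).isPrefixOf (List.map PySem.Chars.lowerChar rest) = true) ↔ _ from hthis]
        have hcc : ¬ (':' = c) := fun e => hc e.symm
        constructor
        · rintro ⟨h1, h2, h3⟩
          exact ⟨Or.inr h2, by simp [h1, h3]⟩
        · rintro ⟨h1, h2⟩
          rcases h1 with h1 | h1
          · exact absurd h1 hcc
          · simp at h2
            exact ⟨h2.1.symm, h1, h2.2⟩

theorem cond_iff (line kw kwc : String) (hd : kwc.toList = kw.toList ++ [':'])
    (hk : ':' ∉ kw.toList) :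
    (PySem.Str.startswith (PySem.Str.lower line) kwc = true ↔
      (':' ∈ line.toList ∧
        PySem.Chars.lower (line.toList.takeWhile (fun c => c != ':')) = kw.toList)) := by
  rw [PySem.Str.startswith,
    show (PySem.Str.lower line).toList = PySem.Chars.lower line.toList from by
      rw [PySem.Str.lower, String.toList_ofList],
    hd]
  exact key_char _ _ hk

def FieldsInv (st : String × String × String × String) (d : PySem.Dict String String) : Prop :=
  st.1 = d.getD "themes" "" ∧ st.2.1 = d.getD "tone" "" ∧
  st.2.2.1 = d.getD "axis" "" ∧ st.2.2.2 = d.getD "focus" ""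

theorem step_pres (st : String × String × String × String) (d : PySem.Dict String String)
    (raw : String) (h : FieldsInv st d) : FieldsInv (stepA st raw) (stepB d raw) := by
  obtain ⟨h1, h2, h3, h4⟩ := h
  unfold stepA stepB
  set line := PySem.Str.strip raw with hline
  by_cases h0 : line = ""
  · simp only [if_pos h0]
    exact ⟨h1, h2, h3, h4⟩
  · simp only [if_neg h0]
    by_cases hm : ':' ∈ line.toList
    · -- line contains ':'
      have hisin : PySem.Str.isIn ":" line = true := by
        rw [PySem.Str.isIn]
        exact (PySem.Chars.isIn_iff_infix _ _).mpr
          ((List.singleton_infix_iff ':' line.toList).mpr hm)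
      rw [if_pos hisin]
      have hsplit := splitC_eq line
      rw [if_pos hm] at hsplit
      have hkey0 : (PySem.List.pyGet? (splitC line) 0).getD "" =
          String.ofList (line.toList.takeWhile (fun c => c != ':')) := by
        rw [hsplit]; rfl
      have hKdef : PySem.Str.lower ((PySem.List.pyGet? (splitC line) 0).getD "") =
          String.ofList (PySem.Chars.lower (line.toList.takeWhile (fun c => c != ':'))) := by
        rw [hkey0, PySem.Str.lower, String.toList_ofList]
      set K := PySem.Chars.lower (line.toList.takeWhile (fun c => c != ':')) with hK
      have cth := cond_iff line "themes" "themes:" (by decide) (by decide)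
      have cto := cond_iff line "tone" "tone:" (by decide) (by decide)
      have cax := cond_iff line "axis" "axis:" (by decide) (by decide)
      have cfo := cond_iff line "focus" "focus:" (by decide) (by decide)
      by_cases k1 : K = "themes".toList
      · rw [if_pos (cth.mpr ⟨hm, k1⟩)]
        rw [show PySem.Str.lower ((PySem.List.pyGet? (splitC line) 0).getD "") = "themes" from by
          rw [hKdef, k1, String.ofList_toList]]
        exact ⟨by rw [PySem.Dict.getD_insert, if_pos rfl],
          by rw [PySem.Dict.getD_insert, if_neg (by decide)]; exact h2,
          by rw [PySem.Dict.getD_insert, if_neg (by decide)]; exact h3,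
          by rw [PySem.Dict.getD_insert, if_neg (by decide)]; exact h4⟩
      · rw [if_neg (fun hcond => k1 (cth.mp hcond).2)]
        by_cases k2 : K = "tone".toList
        · rw [if_pos (cto.mpr ⟨hm, k2⟩)]
          rw [show PySem.Str.lower ((PySem.List.pyGet? (splitC line) 0).getD "") = "tone" from by
            rw [hKdef, k2, String.ofList_toList]]
          exact ⟨by rw [PySem.Dict.getD_insert, if_neg (by decide)]; exact h1,
            by rw [PySem.Dict.getD_insert, if_pos rfl],
            by rw [PySem.Dict.getD_insert, if_neg (by decide)]; exact h3,
            by rw [PySem.Dict.getD_insert, if_neg (by decide)]; exact h4⟩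
        · rw [if_neg (fun hcond => k2 (cto.mp hcond).2)]
          by_cases k3 : K = "axis".toList
          · rw [if_pos (cax.mpr ⟨hm, k3⟩)]
            rw [show PySem.Str.lower ((PySem.List.pyGet? (splitC line) 0).getD "") = "axis" from by
              rw [hKdef, k3, String.ofList_toList]]
            exact ⟨by rw [PySem.Dict.getD_insert, if_neg (by decide)]; exact h1,
              by rw [PySem.Dict.getD_insert, if_neg (by decide)]; exact h2,
              by rw [PySem.Dict.getD_insert, if_pos rfl],
              by rw [PySem.Dict.getD_insert, if_neg (by decide)]; exact h4⟩
          · rw [if_neg (fun hcond => k3 (cax.mp hcond).2)]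
            by_cases k4 : K = "focus".toList
            · rw [if_pos (cfo.mpr ⟨hm, k4⟩)]
              rw [show PySem.Str.lower ((PySem.List.pyGet? (splitC line) 0).getD "") = "focus" from by
                rw [hKdef, k4, String.ofList_toList]]
              exact ⟨by rw [PySem.Dict.getD_insert, if_neg (by decide)]; exact h1,
                by rw [PySem.Dict.getD_insert, if_neg (by decide)]; exact h2,
                by rw [PySem.Dict.getD_insert, if_neg (by decide)]; exact h3,
                by rw [PySem.Dict.getD_insert, if_pos rfl]⟩
            · rw [if_neg (fun hcond => k4 (cfo.mp hcond).2)]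
              have hne : ∀ kw : String, kw.toList ≠ K →
                  kw ≠ PySem.Str.lower ((PySem.List.pyGet? (splitC line) 0).getD "") := by
                intro kw hne he
                exact hne (by rw [he, hKdef, String.toList_ofList])
              exact ⟨by rw [PySem.Dict.getD_insert, if_neg (hne _ (fun e => k1 e.symm))]; exact h1,
                by rw [PySem.Dict.getD_insert, if_neg (hne _ (fun e => k2 e.symm))]; exact h2,
                by rw [PySem.Dict.getD_insert, if_neg (hne _ (fun e => k3 e.symm))]; exact h3,
                by rw [PySem.Dict.getD_insert, if_neg (hne _ (fun e => k4 e.symm))]; exact h4⟩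
    · -- no ':' in line: both sides unchanged
      have hisin : ¬ (PySem.Str.isIn ":" line = true) := by
        rw [PySem.Str.isIn]
        intro hc
        exact hm ((List.singleton_infix_iff ':' line.toList).mp
          ((PySem.Chars.isIn_iff_infix _ _).mp hc))
      rw [if_neg hisin]
      have cth := cond_iff line "themes" "themes:" (by decide) (by decide)
      have cto := cond_iff line "tone" "tone:" (by decide) (by decide)
      have cax := cond_iff line "axis" "axis:" (by decide) (by decide)
      have cfo := cond_iff line "focus" "focus:" (by decide) (by decide)
      rw [if_neg (fun hc => hm (cth.mp hc).1), if_neg (fun hc => hm (cto.mp hc).1),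
        if_neg (fun hc => hm (cax.mp hc).1), if_neg (fun hc => hm (cfo.mp hc).1)]
      exact ⟨h1, h2, h3, h4⟩

theorem fold_pres (lines : List String) (st : String × String × String × String)
    (d : PySem.Dict String String) (h : FieldsInv st d) :
    FieldsInv (lines.foldl stepA st) (lines.foldl stepB d) := by
  induction lines generalizing st d with
  | nil => exact h
  | cons x xs ih => exact ih _ _ (step_pres st d x h)

-- ===== VERDICT (by name: the statement is the Claim_ definition above) =====
theorem call_ai_model_spec : Claim_equal_call_ai_model := by
  intro prompt _
  unfold Spec_call_ai_model
  simp only [call_ai_model, call_ai_model_alt]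
  have h := fold_pres (PySem.Str.splitlines prompt) ("", "", "", "") PySem.Dict.empty
    ⟨rfl, rfl, rfl, rfl⟩
  obtain ⟨h1, h2, h3, h4⟩ := h
  rw [h1, h2, h3, h4]
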